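-- pv_equiv track=rewrite | github.com/HackGiter/GitHub-Project | ESIM_SNI/ESIM.py | remove_punctuations
-- ===== SOURCE A (Python) =====
-- def remove_punctuations(text):
--     punctuations = '@#!?+&*[]-%.:/();$=><|{}^' + "'`"
--
--     for p in punctuations:
--         text = text.replace(p, f' {p} ')
--
--     text = text.replace('...', ' ... ')
--
--     if '...' not in text:
--         text = text.replace('..', ' ... ')
--
--     return text
-- ===== SOURCE B (Python) =====
-- PUNCT = set('@#!?+&*[]-%.:/();$=><|{}^' + "'`")
--
-- def remove_punctuations(text):
--     return ''.join(f' {c} ' if c in PUNCT else c for c in text)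
-- ===== Notes on version B (the rewrite author's own statement) =====
-- stated objective: simpler
-- what changed: Replaces 28 sequential full-string .replace passes (plus two always-no-op ellipsis replaces) with one left-to-right pass that pads each punctuation character with surrounding spaces and leaves other characters unchanged.
import Mathlib
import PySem

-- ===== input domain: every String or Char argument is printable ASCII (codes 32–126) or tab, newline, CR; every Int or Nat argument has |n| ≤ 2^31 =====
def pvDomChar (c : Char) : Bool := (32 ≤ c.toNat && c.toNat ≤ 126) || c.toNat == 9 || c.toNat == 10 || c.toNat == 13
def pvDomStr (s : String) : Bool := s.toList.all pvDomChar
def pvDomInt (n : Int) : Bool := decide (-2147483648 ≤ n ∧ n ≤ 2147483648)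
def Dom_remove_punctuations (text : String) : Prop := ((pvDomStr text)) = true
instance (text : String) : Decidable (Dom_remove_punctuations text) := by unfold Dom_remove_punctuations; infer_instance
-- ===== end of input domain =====

-- B: one left-to-right pass padding punctuation characters, replacing A's 28 sequential full-string .replace passes (simpler).


-- ===== PORT A =====
-- A's punctuation string '@#!?+&*[]-%.:/();$=><|{}^' + "'`"
def pvPunctuationsA : String := "@#!?+&*[]-%.:/();$=><|{}^" ++ "'`"

-- A's loop: for p in punctuations: text = text.replace(p, f' {p} ')
def pvPadA (text : String) : String :=
  pvPunctuationsA.toList.foldl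
    (fun t p => PySem.Str.replace t (String.ofList [p]) (String.ofList [' ', p, ' '])) text

def remove_punctuations (text : String) : String :=
  let text1 := pvPadA text
  let text2 := PySem.Str.replace text1 "..." " ... "
  if ¬ (PySem.Str.isIn "..." text2 = true) then PySem.Str.replace text2 ".." " ... " else text2

-- ===== PORT B =====
def pvPunct : PySem.Set Char := PySem.Set.ofList ("@#!?+&*[]-%.:/();$=><|{}^'`".toList)

def remove_punctuations_alt (text : String) : String :=
  String.ofList (text.toList.flatMap
    (fun c => if PySem.Set.contains pvPunct c then [' ', c, ' '] else [c]))

-- ===== PRECONDITION & SPEC =====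
def Spec_remove_punctuations (text : String) (out : String) : Prop := out = remove_punctuations_alt text
instance (text : String) (out : String) : Decidable (Spec_remove_punctuations text out) := by unfold Spec_remove_punctuations; infer_instance

-- ===== CLAIM (what is proved, stated in full; the proofs are below) =====
def Claim_equal_remove_punctuations : Prop := ∀ (text : String), Dom_remove_punctuations text → Spec_remove_punctuations text (remove_punctuations text)

-- ===== LEMMAS AND PROOFS =====

-- B's per-character padding, on lists
def pvG (c : Char) : List Char :=
  if PySem.Set.contains pvPunct c then [' ', c, ' '] else [c]

def pvPL : List Char := "@#!?+&*[]-%.:/();$=><|{}^'`".toList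

-- replace with a single-character pattern is a flatMap
theorem pv_go_single (p : Char) (nw : List Char) :
    ∀ (l : List Char) (fuel : Nat) (acc : List Char), l.length ≤ fuel →
      PySem.Chars.replace.go [p] nw fuel l acc =
        acc.reverse ++ l.flatMap (fun c => if c = p then nw else [c]) := by
  intro l
  induction l with
  | nil =>
    intro fuel acc _
    cases fuel <;> simp [PySem.Chars.replace.go]
  | cons c t ih =>
    intro fuel acc hle
    cases fuel with
    | zero => simp at hle
    | succ fuel =>
      have hle' : t.length ≤ fuel := by simpa using hle
      by_cases hc : c = p
      · subst hc
        have hpre : List.isPrefixOf [c] (c :: t) = true := by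
          simp [List.isPrefixOf]
        simp only [PySem.Chars.replace.go, hpre, if_true, List.length_cons,
          List.drop_succ_cons, List.length_nil, List.drop_zero]
        rw [ih fuel (nw.reverse ++ acc) hle']
        simp
      · have hpre : List.isPrefixOf [p] (c :: t) = false := by
          rw [Bool.eq_false_iff]
          intro hp
          rcases List.isPrefixOf_iff_prefix.mp hp with ⟨u, hu⟩
          exact hc (List.cons.injEq .. ▸ hu).1.symm
        simp only [PySem.Chars.replace.go, hpre, Bool.false_eq_true, if_false]
        rw [ih fuel (c :: acc) hle']
        simp [hc]

theorem pv_replace_single (s : List Char) (p : Char) (nw : List Char) :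
    PySem.Chars.replace s [p] nw = s.flatMap (fun c => if c = p then nw else [c]) := by
  unfold PySem.Chars.replace
  simpa using pv_go_single p nw s s.length [] le_rfl

-- replace is the identity when the (nonempty) pattern does not occur
theorem pv_go_no_occ (old nw : List Char) :
    ∀ (fuel : Nat) (l acc : List Char), ¬ old <:+: l →
      PySem.Chars.replace.go old nw fuel l acc = acc.reverse ++ l := by
  intro fuel
  induction fuel with
  | zero => intro l acc _; cases l <;> simp [PySem.Chars.replace.go]
  | succ fuel ih =>
    intro l acc h
    cases l with
    | nil => simp [PySem.Chars.replace.go]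
    | cons c t =>
      have hpre : old.isPrefixOf (c :: t) = false := by
        by_contra hp
        exact h ((List.isPrefixOf_iff_prefix.mp (by simpa using hp)).isInfix)
      simp only [PySem.Chars.replace.go, hpre, Bool.false_eq_true, if_false]
      rw [ih t (c :: acc) (fun hin => h (hin.trans (List.suffix_cons c t).isInfix))]
      simp

theorem pv_replace_no_occ (s old nw : List Char) (hne : old ≠ []) (h : ¬ old <:+: s) :
    PySem.Chars.replace s old nw = s := by
  unfold PySem.Chars.replace
  simp [hne, pv_go_no_occ old nw s.length s [] h]

-- folding single-character pad replaces, for distinct non-space patterns, is one flatMap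
theorem pv_fold_pad (ps : List Char) : ps.Nodup → ' ' ∉ ps → ∀ l : List Char,
    ps.foldl (fun t p => t.flatMap (fun c => if c = p then [' ', p, ' '] else [c])) l =
      l.flatMap (fun c => if c ∈ ps then [' ', c, ' '] else [c]) := by
  induction ps with
  | nil => intro _ _ l; simp
  | cons p ps ih =>
    intro hnd hsp l
    obtain ⟨hp, hnd'⟩ := List.nodup_cons.mp hnd
    have hsp' : ' ' ∉ ps := fun h => hsp (List.mem_cons_of_mem _ h)
    have hpne : p ≠ ' ' := fun h => hsp (by simp [h])
    rw [List.foldl_cons, ih hnd' hsp', List.flatMap_assoc]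
    congr 1
    funext c
    by_cases hcp : c = p
    · subst hcp
      simp [hsp', hp]
    · simp [List.mem_cons, hcp]

-- no two adjacent dots in B's output
theorem pv_chain : ∀ l : List Char,
    List.IsChain (fun x y => ¬(x = '.' ∧ y = '.')) (l.flatMap pvG)
  | [] => by simp
  | c :: t => by
    have hsd : (' ' : Char) ≠ '.' := by decide
    rw [List.flatMap_cons, List.isChain_append]
    refine ⟨?_, pv_chain t, ?_⟩
    · unfold pvG
      split_ifs with hc
      · exact List.isChain_cons_cons.mpr ⟨fun h => hsd h.1,
          List.isChain_cons_cons.mpr ⟨fun h => hsd h.2, by simp⟩⟩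
      · simp
    · intro x hx y _
      unfold pvG at hx
      split_ifs at hx with hc
      · simp at hx
        subst hx
        exact fun h => hsd h.1
      · simp at hx
        subst hx
        intro h
        rw [h.1] at hc
        exact hc (by decide)

theorem pv_no_dd (l : List Char) : ¬ ['.', '.'] <:+: l.flatMap pvG := by
  intro h
  obtain ⟨s, t, hst⟩ := h
  have := (List.isChain_iff_forall_rel_of_append_cons_cons.mp (pv_chain l))
    (l₁ := s) (l₂ := t) (a := '.') (b := '.') (by rw [← hst]; simp)
  exact this ⟨rfl, rfl⟩

theorem pv_no_ddd (l : List Char) : ¬ ['.', '.', '.'] <:+: l.flatMap pvG :=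
  fun h => pv_no_dd l (List.IsInfix.trans
    (show ['.', '.'] <:+: ['.', '.', '.'] from ⟨[], ['.'], by simp⟩) h)

-- the string-level fold of A equals the list-level fold
theorem pv_foldA (ps : List Char) : ∀ t : String,
    (ps.foldl (fun t p => PySem.Str.replace t (String.ofList [p]) (String.ofList [' ', p, ' '])) t).toList =
      ps.foldl (fun l p => l.flatMap (fun c => if c = p then [' ', p, ' '] else [c])) t.toList := by
  induction ps with
  | nil => intro t; rfl
  | cons p ps ih =>
    intro t
    rw [List.foldl_cons, List.foldl_cons, ih]
    congr 1
    rw [PySem.Str.toList_replace, String.toList_ofList, String.toList_ofList,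
      pv_replace_single]

-- membership in the literal list agrees with B's set
theorem pv_gp_eq (l : List Char) :
    l.flatMap (fun c => if c ∈ pvPL then [' ', c, ' '] else [c]) = l.flatMap pvG := by
  have hmem : ∀ c : Char, PySem.Set.contains pvPunct c = true ↔ c ∈ pvPL := by
    intro c
    rw [PySem.Set.contains_iff]
    unfold pvPunct pvPL
    exact PySem.Set.mem_ofList _ _
  congr 1
  funext c
  unfold pvG
  by_cases h : c ∈ pvPL
  · rw [if_pos h, if_pos ((hmem c).mpr h)]
  · rw [if_neg h, if_neg (fun hc => h ((hmem c).mp hc))]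

-- A's padding loop produces exactly B's single pass
theorem pv_t1 (text : String) : (pvPadA text).toList = text.toList.flatMap pvG := by
  unfold pvPadA
  rw [pv_foldA]
  have hps : pvPunctuationsA.toList = pvPL := by decide
  rw [hps, pv_fold_pad pvPL (by decide) (by decide), pv_gp_eq]

-- ===== VERDICT (by name: the statement is the Claim_ definition above) =====
theorem remove_punctuations_spec : Claim_equal_remove_punctuations := by
  intro text _
  unfold Spec_remove_punctuations
  apply String.toList_inj.mp
  have h1 := pv_t1 text
  have hB : (remove_punctuations_alt text).toList = text.toList.flatMap pvG := by
    unfold remove_punctuations_alt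
    rw [String.toList_ofList]
    rfl
  rw [hB]
  unfold remove_punctuations
  dsimp only
  have hd3 : ("...".toList) = ['.', '.', '.'] := by decide
  have hd2 : ("..".toList) = ['.', '.'] := by decide
  have h2 : (PySem.Str.replace (pvPadA text) "..." " ... ").toList = text.toList.flatMap pvG := by
    rw [PySem.Str.toList_replace, h1, hd3]
    exact pv_replace_no_occ _ _ _ (by simp) (pv_no_ddd _)
  have hni : ¬ (PySem.Str.isIn "..." (PySem.Str.replace (pvPadA text) "..." " ... ") = true) := by
    rw [PySem.Str.isIn_iff_infix, h2, hd3]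
    exact pv_no_ddd _
  rw [if_pos hni, PySem.Str.toList_replace, h2, hd2]
  exact pv_replace_no_occ _ _ _ (by simp) (pv_no_dd _)
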